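-- pv_equiv track=rewrite | github.com/pjm4github/pictosync | editor/draft_dock.py | _detect_indent
-- ===== SOURCE A (Python) =====
-- def _detect_indent(text: str, obj_start: int) -> str:
--     """Detect the leading whitespace of the line containing *obj_start*."""
--     line_start = text.rfind("\n", 0, obj_start)
--     if line_start < 0:
--         line_start = 0
--     else:
--         line_start += 1  # skip the newline itself
--     indent = ""
--     for ch in text[line_start:obj_start]:
--         if ch in (" ", "\t"):
--             indent += ch
--         else:
--             break
--     return indent
-- ===== SOURCE B (Python) =====
-- def _detect_indent(text: str, obj_start: int) -> str:
--     """Detect the leading whitespace of the line containing *obj_start*."""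
--     # rfind returns -1 when there is no newline, so +1 lands on 0 uniformly
--     line_start = text.rfind("\n", 0, obj_start) + 1
--     segment = text[line_start:obj_start]
--     stripped = segment.lstrip(" \t")
--     return segment[:len(segment) - len(stripped)]
-- ===== Notes on version B (the rewrite author's own statement) =====
-- stated objective: simpler
-- what changed: Replaces the char-by-char accumulator loop with break by lstrip(' \t') plus a length-difference slice, and folds the rfind -1 branch into a uniform +1.
import Mathlib
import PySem

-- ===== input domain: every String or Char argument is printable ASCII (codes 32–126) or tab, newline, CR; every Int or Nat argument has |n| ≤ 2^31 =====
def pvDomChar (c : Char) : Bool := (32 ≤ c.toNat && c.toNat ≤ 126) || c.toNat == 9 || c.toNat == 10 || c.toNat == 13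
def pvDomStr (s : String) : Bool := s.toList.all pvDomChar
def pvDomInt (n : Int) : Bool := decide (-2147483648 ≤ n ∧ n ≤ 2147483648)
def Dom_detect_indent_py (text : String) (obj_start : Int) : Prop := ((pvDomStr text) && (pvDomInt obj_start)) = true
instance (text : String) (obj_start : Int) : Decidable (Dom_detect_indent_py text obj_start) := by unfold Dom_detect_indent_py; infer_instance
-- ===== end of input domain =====

-- B replaces A's char-by-char accumulator loop with lstrip(" \t") plus a length-difference slice (simpler decomposition).


-- ===== PORT A =====
-- the 'for ch in …: if ch in (" ","\t"): indent += ch else: break' loop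
def detectIndentLoopA : List Char → String → String
  | [], indent => indent
  | ch :: rest, indent =>
      if ch = ' ' ∨ ch = '\t' then detectIndentLoopA rest (indent.push ch)
      else indent

def detect_indent_py (text : String) (obj_start : Int) : String :=
  let r := PySem.Str.rfindFrom text "\n" 0 (some obj_start)
  let line_start : Int := if r < 0 then 0 else r + 1
  detectIndentLoopA (PySem.Str.slice text (some line_start) (some obj_start)).toList ""

-- ===== PORT B =====
def detect_indent_py_alt (text : String) (obj_start : Int) : String :=
  let line_start : Int := PySem.Str.rfindFrom text "\n" 0 (some obj_start) + 1
  let segment := (PySem.Str.slice text (some line_start) (some obj_start)).toList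
  -- segment.lstrip(" \t") is exactly dropWhile over {' ', '\t'}
  let stripped := segment.dropWhile (fun c => c = ' ' ∨ c = '\t')
  String.ofList (segment.take (segment.length - stripped.length))

-- ===== PRECONDITION & SPEC =====
def Spec_detect_indent_py (text : String) (obj_start : Int) (out : String) : Prop := out = detect_indent_py_alt text obj_start
instance (text : String) (obj_start : Int) (out : String) : Decidable (Spec_detect_indent_py text obj_start out) := by unfold Spec_detect_indent_py; infer_instance

-- ===== CLAIM (what is proved, stated in full; the proofs are below) =====
def Claim_equal_detect_indent_py : Prop := ∀ (text : String) (obj_start : Int), Dom_detect_indent_py text obj_start → Spec_detect_indent_py text obj_start (detect_indent_py text obj_start)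

-- ===== LEMMAS AND PROOFS =====
theorem rfind_go_ge (s sub : List Char) (k : Nat) : -1 ≤ PySem.Chars.rfind.go s sub k := by
  induction k with
  | zero => simp [PySem.Chars.rfind.go]; split <;> simp
  | succ j ih =>
      rw [PySem.Chars.rfind.go]
      split <;> omega

theorem rfind_ge (l sub : List Char) : -1 ≤ PySem.Chars.rfind l sub := by
  unfold PySem.Chars.rfind
  exact rfind_go_ge _ _ _

theorem rfind_nonneg_of_ne (l sub : List Char) (h : ¬ PySem.Chars.rfind l sub = -1) :
    0 ≤ PySem.Chars.rfind l sub := by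
  have := rfind_ge l sub; omega

theorem rfindFrom_zero_ge (s sub : List Char) (e : Int) :
    -1 ≤ PySem.Chars.rfindFrom s sub 0 (some e) := by
  simp only [PySem.Chars.rfindFrom]
  norm_num
  split_ifs <;>
    first
      | omega
      | (rename_i h; have := rfind_nonneg_of_ne _ _ h; omega)

theorem loopA_eq (cs : List Char) (acc : String) :
    detectIndentLoopA cs acc = acc ++ String.ofList (cs.takeWhile (fun c => decide (c = ' ' ∨ c = '\t'))) := by
  induction cs generalizing acc with
  | nil => simp [detectIndentLoopA]
  | cons c rest ih =>
      simp only [detectIndentLoopA, List.takeWhile]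
      by_cases h : c = ' ' ∨ c = '\t'
      · simp only [h, if_pos, decide_true]
        rw [ih]
        apply String.ext
        simp
      · simp only [h, if_neg, not_false_iff, decide_false]
        apply String.ext
        simp

theorem take_sub_dropWhile (p : Char → Bool) (cs : List Char) :
    cs.take (cs.length - (cs.dropWhile p).length) = cs.takeWhile p := by
  induction cs with
  | nil => simp
  | cons c rest ih =>
      by_cases h : p c
      · have hle : (rest.dropWhile p).length ≤ rest.length := List.length_dropWhile_le p rest
        simp only [List.dropWhile, List.takeWhile, h, List.length_cons]
        rw [show rest.length + 1 - (rest.dropWhile p).length = (rest.length - (rest.dropWhile p).length) + 1 by omega]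
        simp [ih]
      · simp [List.dropWhile, List.takeWhile, h]

-- ===== VERDICT (by name: the statement is the Claim_ definition above) =====
theorem detect_indent_py_spec : Claim_equal_detect_indent_py := by
  intro text obj_start _
  unfold Spec_detect_indent_py detect_indent_py detect_indent_py_alt
  have hge : -1 ≤ PySem.Str.rfindFrom text "\n" 0 (some obj_start) := by
    simp only [PySem.Str.rfindFrom_eq]
    exact rfindFrom_zero_ge _ _ _
  have hls : (if PySem.Str.rfindFrom text "\n" 0 (some obj_start) < 0 then (0:Int)
      else PySem.Str.rfindFrom text "\n" 0 (some obj_start) + 1)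
      = PySem.Str.rfindFrom text "\n" 0 (some obj_start) + 1 := by
    split <;> omega
  simp only [hls]
  rw [loopA_eq, take_sub_dropWhile]
  apply String.ext
  simp
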